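-- pv_equiv track=rewrite | github.com/GlebAkunenko/TreeMaker | Python example/parse.py | from_lines
-- ===== SOURCE A (Python) =====
-- def from_lines(lines : list[str]):
-- 	tree = {}
-- 	def try_add_node(parent, node):
-- 		parent = parent.strip()
-- 		node = node.strip()
-- 		if tree.get(parent):
-- 			if node not in tree[parent]:
-- 				tree[parent].append(node)
-- 		else:
-- 			tree[parent] = [node]
--
-- 	def add_line(line: str, sep='/'):
-- 		nodes = line.split(sep)
-- 		for i in range(1, len(nodes)):
-- 			try_add_node(nodes[i - 1], nodes[i])
--
-- 	for line in lines:
-- 		add_line(line)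
--
-- 	return tree
-- ===== SOURCE B (Python) =====
-- def from_lines(lines: list[str]):
--     pairs = []
--     for line in lines:
--         ns = [t.strip() for t in line.split('/')]
--         pairs += list(zip(ns, ns[1:]))
--     parents = list(dict.fromkeys(p for p, _ in pairs))
--     return {p: list(dict.fromkeys(c for q, c in pairs if q == p))
--             for p in parents}
-- ===== Notes on version B (the rewrite author's own statement) =====
-- stated objective: alternative
-- what changed: B drops the incremental dict entirely: it first flattens all lines into one stripped (parent, child) pair list, then computes the ordered distinct parents with dict.fromkeys and builds each parent's children by a filtering pass over the whole pair list (grouping by repeated selection), instead of A's per-pair dict updates with truthiness/membership branching inside nested helper functions.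
import Mathlib
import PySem

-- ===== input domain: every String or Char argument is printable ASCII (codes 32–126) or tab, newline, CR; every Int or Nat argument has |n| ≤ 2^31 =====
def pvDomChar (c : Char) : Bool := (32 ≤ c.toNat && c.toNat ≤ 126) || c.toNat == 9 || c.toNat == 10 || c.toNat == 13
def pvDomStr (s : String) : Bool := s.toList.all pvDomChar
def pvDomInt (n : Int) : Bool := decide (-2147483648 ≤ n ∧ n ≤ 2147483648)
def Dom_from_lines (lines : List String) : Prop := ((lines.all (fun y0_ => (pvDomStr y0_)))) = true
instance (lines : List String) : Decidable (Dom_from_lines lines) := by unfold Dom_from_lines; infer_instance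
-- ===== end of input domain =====

-- B flattens all lines into one stripped (parent, child) pair list, then groups by
-- filtering that list once per distinct parent (dict.fromkeys for order-preserving
-- dedup), instead of A's incremental dict with per-insert membership branching;
-- return values proved equal on the whole domain. Objective: alternative decomposition.


-- ===== PORT A =====
-- body of try_add_node after the two strips: branches on the truthiness of tree.get(parent)
def tryAddCore (tree : PySem.Dict String (List String)) (parent node : String) :
    PySem.Dict String (List String) :=
  match tree.get? parent with
  | some l =>
      if l.isEmpty then tree.insert parent [node]        -- `if tree.get(parent):` falsy on []
      else if node ∈ l then tree
      else tree.modify parent [] (fun v => v ++ [node])  -- tree[parent].append(node)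
  | none => tree.insert parent [node]

-- try_add_node: parent = parent.strip(); node = node.strip(); then the branching above
def tryAddNode (tree : PySem.Dict String (List String)) (parent node : String) :
    PySem.Dict String (List String) :=
  tryAddCore tree (PySem.Str.strip parent) (PySem.Str.strip node)

-- add_line: nodes = line.split('/'); for i in range(1, len(nodes)): try_add_node(nodes[i-1], nodes[i])
-- sep is the literal "/" (never empty), so split? is always `some`; the `.getD []` is exact.
def addLine (tree : PySem.Dict String (List String)) (line : String) :
    PySem.Dict String (List String) :=
  let nodes := (PySem.Str.split? line "/").getD []
  (PySem.List.pyRange 1 (PySem.List.len nodes)).foldl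
    (fun t i => tryAddNode t (PySem.List.pyGetD nodes (i - 1) "") (PySem.List.pyGetD nodes i "")) tree

def from_lines (lines : List String) : List (String × List String) :=
  (lines.foldl addLine PySem.Dict.empty).items

-- ===== PORT B =====
-- phase one: pairs += zip(ns, ns[1:]) over the stripped tokens of each line;
-- phase two: parents = dict.fromkeys of the first components, then for each parent
-- a filtering pass over the whole pair list, deduplicated with dict.fromkeys.
def from_lines_alt (lines : List String) : List (String × List String) :=
  let pairs := lines.foldl (fun acc line =>
    let ns := ((PySem.Str.split? line "/").getD []).map PySem.Str.strip
    acc ++ ns.zip ns.tail) []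
  let parents := PySem.List.dedup (pairs.map Prod.fst)
  parents.map (fun p =>
    (p, PySem.List.dedup ((pairs.filter (fun pr => pr.1 == p)).map Prod.snd)))

-- ===== PRECONDITION & SPEC =====
def Spec_from_lines (lines : List String) (out : List (String × List String)) : Prop := out = from_lines_alt lines
instance (lines : List String) (out : List (String × List String)) : Decidable (Spec_from_lines lines out) := by unfold Spec_from_lines; infer_instance

-- ===== CLAIM =====
def Claim_equal_from_lines : Prop := ∀ (lines : List String), Dom_from_lines lines → Spec_from_lines lines (from_lines lines)

-- ===== LEMMAS AND PROOFS =====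

-- the raw adjacent pairs contributed by one line
def pairsOf (line : String) : List (String × String) :=
  let nodes := (PySem.Str.split? line "/").getD []
  nodes.zip nodes.tail

def stripPair (pr : String × String) : String × String :=
  (PySem.Str.strip pr.1, PySem.Str.strip pr.2)

def coreA (t : PySem.Dict String (List String)) (pr : String × String) :
    PySem.Dict String (List String) := tryAddNode t pr.1 pr.2

def core2 (t : PySem.Dict String (List String)) (pr : String × String) :
    PySem.Dict String (List String) := tryAddCore t pr.1 pr.2

-- what B computes, as functions of one (stripped) pair list
def specKeys (ps : List (String × String)) : List String :=
  PySem.List.dedup (ps.map Prod.fst)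

def specVal (ps : List (String × String)) (p : String) : List String :=
  PySem.List.dedup ((ps.filter (fun pr => pr.1 == p)).map Prod.snd)

-- the invariant A's dict satisfies along the stripped pair stream
def InvA (ps : List (String × String)) (d : PySem.Dict String (List String)) : Prop :=
  d.keys = specKeys ps ∧ ∀ p, d.getD p [] = specVal ps p

lemma dedup_append_singleton (v : List String) (n : String) :
    PySem.List.dedup (v ++ [n]) =
      if n ∈ v then PySem.List.dedup v else PySem.List.dedup v ++ [n] := by
  simp [PySem.List.dedup_eq_ofList, PySem.Set.ofList_append_singleton,
    PySem.Set.add_eq_ite, PySem.Set.mem_ofList]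

lemma dedup_eq_nil {v : List String} (h : PySem.List.dedup v = []) : v = [] := by
  cases v with
  | nil => rfl
  | cons x xs =>
    exfalso
    have hx : x ∈ PySem.List.dedup (x :: xs) := by
      rw [PySem.List.mem_dedup]; exact List.mem_cons_self
    rw [h] at hx; exact (List.not_mem_nil) hx

lemma specKeys_append (ps : List (String × String)) (p n : String) :
    specKeys (ps ++ [(p, n)]) =
      if p ∈ ps.map Prod.fst then specKeys ps else specKeys ps ++ [p] := by
  unfold specKeys
  rw [List.map_append]
  exact dedup_append_singleton _ p

lemma specVal_append (ps : List (String × String)) (p n c : String) :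
    specVal (ps ++ [(p, n)]) c =
      if c = p then
        (if n ∈ (ps.filter (fun pr => pr.1 == p)).map Prod.snd then specVal ps p
         else specVal ps p ++ [n])
      else specVal ps c := by
  unfold specVal
  rw [List.filter_append]
  by_cases hc : c = p
  · subst hc
    simp only [List.filter_cons, List.filter_nil, beq_self_eq_true]
    simp only [List.map_append]
    exact dedup_append_singleton _ n
  · rw [if_neg hc]
    have : List.filter (fun pr => pr.1 == c) [(p, n)] = [] := by
      simp [beq_iff_eq, Ne.symm hc]
    rw [this, List.append_nil]

lemma mem_specKeys_iff (ps : List (String × String)) (p : String) :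
    p ∈ specKeys ps ↔ p ∈ ps.map Prod.fst := PySem.List.mem_dedup _ _

lemma InvA_step {ps : List (String × String)} {d : PySem.Dict String (List String)}
    (h : InvA ps d) (p n : String) :
    InvA (ps ++ [(p, n)]) (tryAddCore d p n) := by
  obtain ⟨hkeys, hval⟩ := h
  have hfil : n ∈ (ps.filter (fun pr => pr.1 == p)).map Prod.snd ↔ n ∈ specVal ps p := by
    unfold specVal; rw [PySem.List.mem_dedup]
  unfold tryAddCore
  cases hA : d.get? p with
  | none =>
      have hcA : d.contains p = false := by
        rw [PySem.Dict.contains_eq_isSome_get?, hA]; rfl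
      have hpk : p ∉ d.keys := by
        intro hm; rw [← PySem.Dict.contains_iff_mem_keys] at hm; rw [hcA] at hm; cases hm
      have hpm : p ∉ ps.map Prod.fst := by
        rw [← mem_specKeys_iff, ← hkeys]; exact hpk
      have hg : d.getD p [] = [] := PySem.Dict.getD_of_not_contains d _ hcA
      have hfnil : (ps.filter (fun pr => pr.1 == p)) = [] := by
        rw [List.filter_eq_nil_iff]
        intro pr hpr
        simp only [beq_iff_eq]
        intro he
        exact hpm (List.mem_map.mpr ⟨pr, hpr, he⟩)
      constructor
      · rw [PySem.Dict.keys_insert_of_not_contains _ _ (by simpa using hcA),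
          specKeys_append, if_neg hpm, hkeys]
      · intro c
        rw [PySem.Dict.getD_insert, specVal_append]
        by_cases hcp : c = p
        · rw [if_pos hcp, if_pos hcp, if_neg (by rw [hfnil]; simp)]
          unfold specVal
          rw [hfnil]
          rfl
        · rw [if_neg hcp, if_neg hcp]; exact hval c
  | some l =>
      have hcA : d.contains p = true := by
        rw [PySem.Dict.contains_eq_isSome_get?, hA]; rfl
      have hpm : p ∈ ps.map Prod.fst := by
        rw [← mem_specKeys_iff, ← hkeys, ← PySem.Dict.contains_iff_mem_keys]; exact hcA
      have hg : d.getD p [] = l := by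
        rw [PySem.Dict.getD_eq_get?_getD, hA]; rfl
      have hlv : l = specVal ps p := by rw [← hval p, hg]
      show InvA _
        (if l.isEmpty = true then d.insert p [n]
         else if n ∈ l then d else d.modify p [] (fun v => v ++ [n]))
      by_cases hemp : l.isEmpty = true
      · rw [if_pos hemp]
        have hl : l = [] := List.isEmpty_iff.mp hemp
        have hfnil : (ps.filter (fun pr => pr.1 == p)) = [] := by
          apply List.map_eq_nil_iff.mp
          apply dedup_eq_nil
          show specVal ps p = []
          rw [← hlv, hl]
        constructor
        · rw [PySem.Dict.keys_insert_of_contains _ _ hcA, specKeys_append, if_pos hpm, hkeys]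
        · intro c
          rw [PySem.Dict.getD_insert, specVal_append]
          by_cases hcp : c = p
          · rw [if_pos hcp, if_pos hcp, if_neg (by rw [hfnil]; simp)]
            unfold specVal
            rw [hfnil]
            rfl
          · rw [if_neg hcp, if_neg hcp]; exact hval c
      · rw [if_neg hemp]
        by_cases hmem : n ∈ l
        · rw [if_pos hmem]
          have hmemF : n ∈ (ps.filter (fun pr => pr.1 == p)).map Prod.snd := by
            rw [hfil, ← hlv]; exact hmem
          constructor
          · rw [specKeys_append, if_pos hpm]; exact hkeys
          · intro c
            rw [specVal_append]
            by_cases hcp : c = p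
            · rw [if_pos hcp, if_pos hmemF, hcp]; exact hval p
            · rw [if_neg hcp]; exact hval c
        · rw [if_neg hmem]
          have hmemF : n ∉ (ps.filter (fun pr => pr.1 == p)).map Prod.snd := by
            rw [hfil, ← hlv]; exact hmem
          constructor
          · rw [PySem.Dict.keys_modify, PySem.Dict.keys_insert_of_contains _ _ hcA,
              specKeys_append, if_pos hpm, hkeys]
          · intro c
            rw [PySem.Dict.getD_modify, specVal_append]
            by_cases hcp : c = p
            · rw [if_pos hcp, if_pos hcp, if_neg hmemF, hg, hlv]
            · rw [if_neg hcp, if_neg hcp]; exact hval c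

lemma InvA_foldl (ps : List (String × String)) :
    InvA ps (ps.foldl core2 PySem.Dict.empty) := by
  induction ps using List.reverseRecOn with
  | nil =>
      constructor
      · simp only [List.foldl_nil]
        rw [PySem.Dict.keys_empty]; rfl
      · intro p; rfl
  | append_singleton ps pr ih =>
      rw [List.foldl_append]
      obtain ⟨p, n⟩ := pr
      exact InvA_step ih p n

-- A's index loop over range(1, len(nodes)) is the fold over adjacent pairs
lemma foldl_range_adjacent {α β : Type} (f : β → α → α → β) (d : α) (xs : List α) (b : β) :
    (PySem.List.pyRange 1 (PySem.List.len xs)).foldl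
      (fun t i => f t (PySem.List.pyGetD xs (i - 1) d) (PySem.List.pyGetD xs i d)) b
    = (xs.zip xs.tail).foldl (fun t pr => f t pr.1 pr.2) b := by
  cases xs with
  | nil =>
      rw [PySem.List.pyRange_of_pos 1 (PySem.List.len ([] : List α)) (by norm_num)]
      simp [PySem.List.len]
  | cons x rest =>
      have hlen : PySem.List.len (x :: rest) = ((rest.length + 1 : ℕ) : Int) := by
        simp [PySem.List.len]
      rw [hlen, PySem.List.pyRange_of_pos 1 _ (by norm_num)]
      have hb : ((rest.length + 1 : ℕ) : Int) - 1 + 1 - 1 = ((rest.length : ℕ) : Int) := by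
        push_cast; ring
      have hcnt : (if (1:Int) < ((rest.length + 1 : ℕ) : Int) then
          ((((rest.length + 1 : ℕ) : Int) - 1 + 1 - 1) / 1).toNat else 0) = rest.length := by
        rw [hb]
        split_ifs with h
        · simp
        · push_cast at h; omega
      rw [hcnt, List.foldl_map]
      have hzip : (x :: rest).zip (x :: rest).tail
          = (List.range rest.length).map
              (fun k => ((x :: rest).getD k d, (x :: rest).getD (k + 1) d)) := by
        apply List.ext_getElem
        · simp
        · intro i h1 h2
          have hi : i < rest.length := by simpa using h1
          simp only [List.getElem_zip, List.getElem_map, List.getElem_range, List.tail_cons]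
          have hgd1 : (x :: rest).getD i d = (x :: rest)[i]'(by simp; omega) :=
            List.getD_eq_getElem _ _ (by simp; omega)
          have hgd2 : (x :: rest).getD (i + 1) d = (x :: rest)[i + 1]'(by simp; omega) :=
            List.getD_eq_getElem _ _ (by simp; omega)
          rw [hgd1, hgd2]
          simp
      rw [hzip, List.foldl_map]
      apply List.foldl_ext
      intro t k _
      show f t (PySem.List.pyGetD (x :: rest) (1 + 1 * (k : Int) - 1) d)
            (PySem.List.pyGetD (x :: rest) (1 + 1 * (k : Int)) d)
          = f t ((x :: rest).getD k d) ((x :: rest).getD (k + 1) d)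
      have h1 : (1 + 1 * (k : Int) - 1) = ((k : ℕ) : Int) := by ring
      have h2 : (1 + 1 * (k : Int)) = (((k + 1 : ℕ)) : Int) := by push_cast; ring
      rw [h1, h2, PySem.List.pyGetD_natCast, PySem.List.pyGetD_natCast]

lemma addLine_eq_pairs (t : PySem.Dict String (List String)) (line : String) :
    addLine t line = (pairsOf line).foldl coreA t := by
  unfold addLine pairsOf
  exact foldl_range_adjacent (fun t a b => tryAddNode t a b) ""
    ((PySem.Str.split? line "/").getD []) t

-- stripping the tokens first gives exactly the stripped raw pairs
lemma zip_tail_map {α β : Type} (f : α → β) (xs : List α) :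
    (xs.map f).zip (xs.map f).tail = (xs.zip xs.tail).map (fun pr => (f pr.1, f pr.2)) := by
  cases xs with
  | nil => rfl
  | cons x rest =>
      rw [List.map_cons, List.tail_cons, List.tail_cons,
        show f x :: rest.map f = (x :: rest).map f from rfl, List.zip_map]
      apply List.map_congr_left
      intro pr _
      rfl

lemma stripped_pairs_eq (line : String) :
    (let ns := ((PySem.Str.split? line "/").getD []).map PySem.Str.strip
     ns.zip ns.tail) = (pairsOf line).map stripPair := by
  unfold pairsOf
  exact zip_tail_map PySem.Str.strip _

lemma foldl_coreA_eq_core2 (ps : List (String × String))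
    (d : PySem.Dict String (List String)) :
    ps.foldl coreA d = (ps.map stripPair).foldl core2 d := by
  rw [List.foldl_map]
  rfl

-- ===== VERDICT =====
theorem from_lines_spec : Claim_equal_from_lines := by
  intro lines _
  unfold Spec_from_lines
  -- A's side: fold of core2 over the stripped pair stream
  have hA : from_lines lines
      = (((lines.flatMap pairsOf).map stripPair).foldl core2 PySem.Dict.empty).items := by
    unfold from_lines
    have haddLine : addLine = fun t line => (pairsOf line).foldl coreA t := by
      funext t line; exact addLine_eq_pairs t line
    rw [haddLine, ← foldl_coreA_eq_core2, ← List.foldl_flatMap]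
  -- B's side: specKeys/specVal over the same stream
  have hpairs : lines.foldl (fun acc line =>
      let ns := ((PySem.Str.split? line "/").getD []).map PySem.Str.strip
      acc ++ ns.zip ns.tail) [] = (lines.flatMap pairsOf).map stripPair := by
    have h1 := PySem.List.foldl_append_eq_flatMap
      (fun line => (pairsOf line).map stripPair) lines ([] : List (String × String))
    simp only [stripped_pairs_eq]
    rw [h1, List.nil_append, List.map_flatMap]
  have hB : from_lines_alt lines
      = (specKeys ((lines.flatMap pairsOf).map stripPair)).map
          (fun p => (p, specVal ((lines.flatMap pairsOf).map stripPair) p)) := by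
    unfold from_lines_alt
    simp only [hpairs]
    rfl
  rw [hA, hB]
  obtain ⟨hkeys, hval⟩ := InvA_foldl ((lines.flatMap pairsOf).map stripPair)
  have hnodup : ((((lines.flatMap pairsOf).map stripPair)).foldl core2
      PySem.Dict.empty).keys.Nodup := by
    rw [hkeys]; exact PySem.List.nodup_dedup _
  rw [PySem.Dict.items_eq_map_keys _ hnodup ([] : List String), hkeys]
  apply List.map_congr_left
  intro k _
  rw [hval k]
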